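-- pv_equiv track=rewrite | github.com/Ching-Chieh/test | Strategies/DPO.py | find_recent_trough
-- ===== SOURCE A (Python) =====
-- def find_recent_trough(value, window=2):
--     n = len(value)
--
--     for i in range(n - window - 1, window - 1, -1):
--         left = value[i-window:i]
--         right = value[i+1:i+window+1]
--
--         if (
--             value[i] == min(value[i-window:i+window+1]) and
--             value[i] < min(left) and
--             value[i] < min(right)
--             ):
--             bars_ago = n - 1 - i
--             return bars_ago
--
--     return None
-- ===== SOURCE B (Python) =====
-- def _prev_le(vals):
--     # p[i] = largest j < i with vals[j] <= vals[i], else -1 (monotonic stack)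
--     p = []
--     stack = []
--     for i, v in enumerate(vals):
--         while stack and vals[stack[-1]] > v:
--             stack.pop()
--         p.append(stack[-1] if stack else -1)
--         stack.append(i)
--     return p
--
--
-- def find_recent_trough(value, window=2):
--     n = len(value)
--     if window < 1:
--         return None
--     prev = _prev_le(value)                 # nearest index to the left with value <= value[i]
--     nxt_rev = _prev_le(value[::-1])        # same on the reversed list -> nearest to the right
--     for i in range(n - window - 1, window - 1, -1):
--         if prev[i] < i - window and nxt_rev[n - 1 - i] < n - 1 - i - window:
--             return n - 1 - i
--     return None
-- ===== Notes on version B (the rewrite author's own statement) =====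
-- stated objective: alternative
-- what changed: B replaces the per-position slice-and-min scans with two monotonic-stack passes computing each index's nearest smaller-or-equal neighbour (left pass, and the same pass on the reversed list for the right side), then a single backward scan tests each candidate in O(1).
import Mathlib
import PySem

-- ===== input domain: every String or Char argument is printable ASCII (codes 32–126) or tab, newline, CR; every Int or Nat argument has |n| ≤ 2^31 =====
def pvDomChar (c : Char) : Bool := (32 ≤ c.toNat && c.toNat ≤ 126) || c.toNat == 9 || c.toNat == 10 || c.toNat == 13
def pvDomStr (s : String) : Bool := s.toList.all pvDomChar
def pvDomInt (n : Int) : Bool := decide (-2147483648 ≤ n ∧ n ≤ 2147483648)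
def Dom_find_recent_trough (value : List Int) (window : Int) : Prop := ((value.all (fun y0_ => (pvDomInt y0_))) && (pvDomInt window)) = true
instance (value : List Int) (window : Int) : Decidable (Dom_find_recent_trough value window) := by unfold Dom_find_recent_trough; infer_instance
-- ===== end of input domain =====

-- B replaces A's per-position slice-and-min scans by two monotonic-stack "nearest
-- smaller-or-equal neighbour" passes plus one backward scan (alternative algorithm,
-- same return values on Pre_).

-- ===== PORT A =====
def find_recent_trough (value : List Int) (window : Int) : Option Int :=
  (PySem.List.pyRange ((value.length : Int) - window - 1) (window - 1) (-1)).findSome? (fun i =>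
    match PySem.List.pyGet? value i,
          PySem.List.min? (PySem.List.slice value (some (i - window)) (some (i + window + 1))) (fun x => x),
          PySem.List.min? (PySem.List.slice value (some (i - window)) (some i)) (fun x => x),
          PySem.List.min? (PySem.List.slice value (some (i + 1)) (some (i + window + 1))) (fun x => x) with
    | some v, some m, some ml, some mr =>
        if v = m ∧ v < ml ∧ v < mr then some ((value.length : Int) - 1 - i) else none
    | _, _, _, _ => none)
    -- a fall-through 'none' is Python raising (min of an empty slice / IndexError): outside Pre_

-- ===== PORT B =====
-- 'while stack and value[stack[-1]] > v: stack.pop()'  (list head = Python's stack[-1])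
def popGT (vals : List Int) (v : Int) : List Int → List Int
  | [] => []
  | j :: s => if v < PySem.List.pyGetD vals j 0 then popGT vals v s else j :: s

-- 'stack[-1] if stack else -1'
def headIdx : List Int → Int
  | [] => -1
  | j :: _ => j

-- loop body of _prev_le: state (p, stack), one enumerate item (i, v)
def pvStep (vals : List Int) (st : List Int × List Int) (iv : Int × Int) : List Int × List Int :=
  let s := popGT vals iv.2 st.2
  (st.1 ++ [headIdx s], iv.1 :: s)

-- _prev_le(vals): for i, v in enumerate(vals): pop; p.append(...); push
def prevLE (vals : List Int) : List Int :=
  ((PySem.List.enumerate vals 0).foldl (pvStep vals) ([], [])).1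

-- value[::-1] is ported as List.reverse (PySem.List.slice?_none_none_neg_one)
def find_recent_trough_alt (value : List Int) (window : Int) : Option Int :=
  if window < 1 then none
  else
    (PySem.List.pyRange ((value.length : Int) - window - 1) (window - 1) (-1)).findSome? (fun i =>
      match PySem.List.pyGet? (prevLE value) i with
      | none => none
      | some a =>
        match PySem.List.pyGet? (prevLE value.reverse) ((value.length : Int) - 1 - i) with
        | none => none
        | some b =>
          if a < i - window ∧ b < (value.length : Int) - 1 - i - window then
            some ((value.length : Int) - 1 - i)
          else none)

-- ===== PRECONDITION & SPEC =====
-- Pre_ excludes exactly the inputs on which A raises: window ≤ 0 with a nonempty list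
-- (ValueError: min of an empty slice, or IndexError for negative window), and a negative
-- window even on the empty list (IndexError).
def Pre_find_recent_trough (value : List Int) (window : Int) : Prop :=
  1 ≤ window ∨ (value = [] ∧ window = 0)
instance (value : List Int) (window : Int) : Decidable (Pre_find_recent_trough value window) := by
  unfold Pre_find_recent_trough; infer_instance

def pvWitness_find_recent_trough : List Int × Int := ([3, 1, 2], 1)

def Spec_find_recent_trough (value : List Int) (window : Int) (out : Option Int) : Prop :=
  out = find_recent_trough_alt value window
instance (value : List Int) (window : Int) (out : Option Int) : Decidable (Spec_find_recent_trough value window out) := by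
  unfold Spec_find_recent_trough; infer_instance

-- ===== CLAIM (what is proved, stated in full; the proofs are below) =====
def Claim_equal_find_recent_trough : Prop := ∀ (value : List Int) (window : Int), Dom_find_recent_trough value window → Pre_find_recent_trough value window → Spec_find_recent_trough value window (find_recent_trough value window)


-- ===== LEMMAS AND PROOFS =====

def PvRel (vals : List Int) (a b : Int) : Prop :=
  b < a ∧ PySem.List.pyGetD vals b 0 ≤ PySem.List.pyGetD vals a 0

def MemIff (vals : List Int) (i : Int) (s : List Int) : Prop :=
  ∀ j : Int, j ∈ s ↔ (0 ≤ j ∧ j < i ∧ ∀ m : Int, j < m → m < i →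
    PySem.List.pyGetD vals j 0 ≤ PySem.List.pyGetD vals m 0)

theorem popGT_suffix (vals : List Int) (v : Int) (s : List Int) : (popGT vals v s).IsSuffix s := by
  induction s with
  | nil => simp [popGT]
  | cons j t ih =>
    by_cases h : v < PySem.List.pyGetD vals j 0
    · simp only [popGT, if_pos h]
      exact ih.trans (List.suffix_cons j t)
    · simp [popGT, if_neg h]

theorem popGT_mem (vals : List Int) (v : Int) (s : List Int) (hp : s.Pairwise (PvRel vals)) (j : Int) :
    j ∈ popGT vals v s ↔ j ∈ s ∧ PySem.List.pyGetD vals j 0 ≤ v := by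
  induction s with
  | nil => simp [popGT]
  | cons a t ih =>
    rcases List.pairwise_cons.mp hp with ⟨ha, ht⟩
    by_cases h : v < PySem.List.pyGetD vals a 0
    · simp only [popGT, if_pos h]
      rw [ih ht]
      constructor
      · rintro ⟨hj, hle⟩; exact ⟨List.mem_cons_of_mem a hj, hle⟩
      · rintro ⟨hj, hle⟩
        rcases List.mem_cons.mp hj with rfl | hj
        · omega
        · exact ⟨hj, hle⟩
    · simp only [popGT, if_neg h]
      rw [not_lt] at h
      constructor
      · intro hj
        rcases List.mem_cons.mp hj with rfl | hjt
        · exact ⟨List.mem_cons_self, h⟩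
        · exact ⟨List.mem_cons_of_mem a hjt, le_trans (ha j hjt).2 h⟩
      · rintro ⟨hj, _⟩; exact hj

def PPrev (vals : List Int) (i : Int) (e : Int) : Prop :=
  (e = -1 ∧ ∀ j : Int, 0 ≤ j → j < i → PySem.List.pyGetD vals i 0 < PySem.List.pyGetD vals j 0) ∨
  (0 ≤ e ∧ e < i ∧ PySem.List.pyGetD vals e 0 ≤ PySem.List.pyGetD vals i 0 ∧
    ∀ j : Int, e < j → j < i → PySem.List.pyGetD vals i 0 < PySem.List.pyGetD vals j 0)

theorem exists_le (vals : List Int) (i : Int) (s : List Int) (hm : MemIff vals i s) :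
    ∀ d : Nat, ∀ j : Int, 0 ≤ j → j < i → (i - j).toNat ≤ d →
      ∃ t ∈ s, j ≤ t ∧ PySem.List.pyGetD vals t 0 ≤ PySem.List.pyGetD vals j 0 := by
  intro d
  induction d with
  | zero => intro j h0 h1 h2; omega
  | succ d ih =>
    intro j h0 h1 h2
    by_cases hj : j ∈ s
    · exact ⟨j, hj, le_refl _, le_refl _⟩
    · have hn : ¬(0 ≤ j ∧ j < i ∧ ∀ m : Int, j < m → m < i →
          PySem.List.pyGetD vals j 0 ≤ PySem.List.pyGetD vals m 0) := fun h => hj ((hm j).mpr h)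
      have hex : ∃ m : Int, j < m ∧ m < i ∧
          PySem.List.pyGetD vals m 0 < PySem.List.pyGetD vals j 0 := by
        by_contra hc
        exact hn ⟨h0, h1, fun m hm1 hm2 => by
          rcases not_exists.mp hc m with h
          by_contra hlt
          exact h ⟨hm1, hm2, by omega⟩⟩
      rcases hex with ⟨m, hm1, hm2, hm3⟩
      rcases ih m (by omega) hm2 (by omega) with ⟨t, ht, ht1, ht2⟩
      exact ⟨t, ht, by omega, le_trans ht2 (le_of_lt hm3)⟩

theorem step_inv (vals : List Int) (i : Int) (s : List Int) (hm : MemIff vals i s)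
    (hp : s.Pairwise (PvRel vals)) (h0 : 0 ≤ i) :
    MemIff vals (i+1) (i :: popGT vals (PySem.List.pyGetD vals i 0) s) ∧
    (i :: popGT vals (PySem.List.pyGetD vals i 0) s).Pairwise (PvRel vals) ∧
    PPrev vals i (headIdx (popGT vals (PySem.List.pyGetD vals i 0) s)) := by
  set v := PySem.List.pyGetD vals i 0 with hv
  have hmem : ∀ j : Int, j ∈ popGT vals v s ↔ j ∈ s ∧ PySem.List.pyGetD vals j 0 ≤ v :=
    popGT_mem vals v s hp
  have hp' : (popGT vals v s).Pairwise (PvRel vals) :=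
    List.Pairwise.sublist (popGT_suffix vals v s).sublist hp
  refine ⟨?_, ?_, ?_⟩
  · -- MemIff at i+1
    intro j
    constructor
    · intro hj
      rcases List.mem_cons.mp hj with rfl | hj'
      · exact ⟨h0, by omega, fun m hm1 hm2 => by omega⟩
      · rcases (hmem j).mp hj' with ⟨hjs, hjv⟩
        rcases (hm j).mp hjs with ⟨hj0, hji, hall⟩
        refine ⟨hj0, by omega, fun m hm1 hm2 => ?_⟩
        by_cases hmi : m = i
        · subst hmi; exact hjv
        · exact hall m hm1 (by omega)
    · rintro ⟨hj0, hji, hall⟩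
      by_cases hji' : j = i
      · subst hji'; exact List.mem_cons_self
      · refine List.mem_cons_of_mem _ ((hmem j).mpr ⟨(hm j).mpr ⟨hj0, by omega, fun m hm1 hm2 => hall m hm1 (by omega)⟩, ?_⟩)
        exact hall i (by omega) (by omega)
  · -- Pairwise
    refine List.pairwise_cons.mpr ⟨fun b hb => ?_, hp'⟩
    rcases (hmem b).mp hb with ⟨hbs, hbv⟩
    exact ⟨((hm b).mp hbs).2.1, hbv⟩
  · -- PPrev
    cases hcase : popGT vals v s with
    | nil =>
      rw [hcase] at hmem
      left
      refine ⟨rfl, fun j hj0 hji => ?_⟩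
      rcases exists_le vals i s hm (i - j).toNat j hj0 hji (le_refl _) with ⟨t, ht, ht1, ht2⟩
      have hvt : ¬ PySem.List.pyGetD vals t 0 ≤ v := by
        intro hle
        exact absurd ((hmem t).mpr ⟨ht, hle⟩) (List.not_mem_nil)
      omega
    | cons e rest =>
      rw [hcase] at hmem hp'
      simp only [headIdx]
      right
      have he : e ∈ e :: rest := List.mem_cons_self
      rcases (hmem e).mp he with ⟨hes, hev⟩
      rcases (hm e).mp hes with ⟨he0, hei, _⟩
      have hmax : ∀ t : Int, t ∈ e :: rest → t ≤ e := by
        intro t ht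
        rcases List.mem_cons.mp ht with rfl | ht'
        · exact le_refl _
        · exact le_of_lt ((List.pairwise_cons.mp hp').1 t ht').1
      refine ⟨he0, hei, hev, fun m hm1 hm2 => ?_⟩
      by_cases hms : m ∈ s
      · by_cases hmv : PySem.List.pyGetD vals m 0 ≤ v
        · have := hmax m ((hmem m).mpr ⟨hms, hmv⟩)
          omega
        · omega
      · rcases exists_le vals i s hm (i - m).toNat m (by omega) hm2 (le_refl _) with ⟨t, ht, ht1, ht2⟩
        by_cases htv : PySem.List.pyGetD vals t 0 ≤ v
        · have := hmax t ((hmem t).mpr ⟨ht, htv⟩)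
          omega
        · omega

def foldState (vals : List Int) (k : Nat) : List Int × List Int :=
  (PySem.List.pyRange 0 (k : Int) 1).foldl (fun st j => pvStep vals st (j, PySem.List.pyGetD vals j 0)) ([], [])

theorem fold_inv (vals : List Int) (k : Nat) :
    (foldState vals k).1.length = k ∧
    (∀ t : Nat, t < k → PPrev vals t ((foldState vals k).1.getD t 0)) ∧
    MemIff vals k (foldState vals k).2 ∧
    (foldState vals k).2.Pairwise (PvRel vals) := by
  induction k with
  | zero =>
    have h0 : PySem.List.pyRange 0 ((0 : Nat) : Int) 1 = [] :=
      PySem.List.pyRange_one_eq_nil (by simp)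
    have hfs : foldState vals 0 = ([], []) := by
      unfold foldState
      rw [h0]
      rfl
    refine ⟨by rw [hfs]; rfl, fun t ht => by omega, fun j => ?_, by rw [hfs]; exact List.Pairwise.nil⟩
    rw [hfs]
    constructor
    · intro h
      exact absurd h (List.not_mem_nil)
    · rintro ⟨h1, h2, _⟩
      omega
  | succ k ih =>
    have hr : PySem.List.pyRange 0 ((k + 1 : Nat) : Int) 1
        = PySem.List.pyRange 0 (k : Int) 1 ++ [(k : Int)] := by
      have h := PySem.List.pyRange_one_succ_right (a := 0) (b := (k : Int)) (by positivity)
      push_cast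
      rw [h]
    have hfs : foldState vals (k + 1)
        = pvStep vals (foldState vals k) ((k : Int), PySem.List.pyGetD vals (k : Int) 0) := by
      unfold foldState
      rw [hr, List.foldl_append]
      rfl
    rcases ih with ⟨hlen, hpp, hmi, hpw⟩
    rcases step_inv vals (k : Int) (foldState vals k).2 hmi hpw (by positivity) with ⟨hm', hp', hppk⟩
    have hcast : ((k + 1 : Nat) : Int) = (k : Int) + 1 := by push_cast; ring
    refine ⟨?_, ?_, ?_, ?_⟩
    · rw [hfs]
      simp only [pvStep, List.length_append, hlen, List.length_cons, List.length_nil]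
    · intro t ht
      rw [hfs]
      simp only [pvStep]
      by_cases htk : t < k
      · rw [List.getD_eq_getElem?_getD, List.getElem?_append_left (by omega), ← List.getD_eq_getElem?_getD]
        exact hpp t htk
      · have hteq : t = k := by omega
        subst hteq
        rw [List.getD_eq_getElem?_getD, List.getElem?_append_right (by omega)]
        simp only [hlen, Nat.sub_self, List.getElem?_cons_zero, Option.getD_some]
        exact hppk
    · rw [hfs, hcast]
      simp only [pvStep]
      exact hm'
    · rw [hfs]
      simp only [pvStep]
      exact hp'

theorem prevLE_eq (vals : List Int) : prevLE vals = (foldState vals vals.length).1 := by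
  unfold prevLE foldState
  rw [PySem.List.enumerate_eq_map_pyRange (d := 0), List.foldl_map, PySem.List.len_eq]

theorem prevLE_length (vals : List Int) : (prevLE vals).length = vals.length := by
  rw [prevLE_eq]; exact (fold_inv vals vals.length).1

theorem prevLE_spec (vals : List Int) (i : Int) (h0 : 0 ≤ i) (h1 : i < (vals.length : Int)) :
    PPrev vals i (PySem.List.pyGetD (prevLE vals) i 0) := by
  have ht : i = ((i.toNat : Nat) : Int) := by omega
  have h2 : i.toNat < vals.length := by omega
  have h3 := (fold_inv vals vals.length).2.1 i.toNat h2
  rw [prevLE_eq, ht, PySem.List.pyGetD_natCast]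
  exact h3

theorem pprev_iff (vals : List Int) (i w e : Int) (_hw : 1 ≤ w) (hwi : w ≤ i)
    (hpp : PPrev vals i e) :
    (e < i - w ↔ ∀ j : Int, i - w ≤ j → j < i →
      PySem.List.pyGetD vals i 0 < PySem.List.pyGetD vals j 0) := by
  rcases hpp with ⟨he, hall⟩ | ⟨he0, hei, hev, hall⟩
  · constructor
    · intro _ j hj1 hj2
      exact hall j (by omega) hj2
    · intro _
      omega
  · constructor
    · intro hlt j hj1 hj2
      exact hall j (by omega) hj2
    · intro hforall
      by_contra hge
      have := hforall e (by omega) hei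
      omega

theorem pyGet?_eq_pyGetD (l : List Int) (i : Int) (h0 : 0 ≤ i) (h1 : i < (l.length : Int)) :
    PySem.List.pyGet? l i = some (PySem.List.pyGetD l i 0) := by
  rw [PySem.List.pyGet?_eq_some_getElem l h0 h1, PySem.List.pyGetD_eq_getElem l 0 h0 h1]

theorem pyGetD_int_eq (value : List Int) (j : Int) (k : Nat) (h : j = (k : Int)) :
    PySem.List.pyGetD value j 0 = value.getD k 0 := by
  rw [h, PySem.List.pyGetD_natCast]

theorem pyGetD_reverse (l : List Int) (m : Int) (h0 : 0 ≤ m) (h1 : m < (l.length : Int)) :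
    PySem.List.pyGetD l.reverse m 0 = PySem.List.pyGetD l ((l.length : Int) - 1 - m) 0 := by
  have hm : m.toNat < l.length := by omega
  have hr : m.toNat < l.reverse.length := by simpa using hm
  rw [PySem.List.pyGetD_eq_getElem l.reverse 0 h0 (by simpa using h1),
      PySem.List.pyGetD_eq_getElem l 0 (by omega) (by omega)]
  rw [List.getElem_reverse]
  have e1 : ((l.length : Int) - 1 - m).toNat = l.length - 1 - m.toNat := by omega
  simp only [e1]

theorem pv_lt_min_iff (l : List Int) (m v : Int) (h : PySem.List.min? l (fun x => x) = some m) :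
    (v < m ↔ ∀ x ∈ l, v < x) := by
  constructor
  · intro hv x hx
    exact lt_of_lt_of_le hv (PySem.List.min?_isMin h x hx)
  · intro hall
    exact hall m (PySem.List.min?_mem h)

theorem mem_segment (value : List Int) (a b : Nat) (hab : a + b ≤ value.length) (x : Int) :
    x ∈ (value.drop a).take b ↔ ∃ k : Nat, k < b ∧ x = value.getD (a + k) 0 := by
  have hlen : ((value.drop a).take b).length = b := by
    simp [List.length_take, List.length_drop]
    omega
  rw [List.mem_iff_getElem]
  constructor
  · rintro ⟨k, hk, hx⟩
    refine ⟨k, by omega, ?_⟩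
    rw [List.getElem_take, List.getElem_drop] at hx
    rw [List.getD_eq_getElem _ _ (by omega)]
    exact hx.symm
  · rintro ⟨k, hk, hx⟩
    refine ⟨k, by omega, ?_⟩
    rw [List.getElem_take, List.getElem_drop]
    rw [List.getD_eq_getElem _ _ (by omega)] at hx
    exact hx.symm

theorem findSome?_congr {α β : Type} (l : List α) (f g : α → Option β)
    (h : ∀ x ∈ l, f x = g x) : l.findSome? f = l.findSome? g := by
  induction l with
  | nil => rfl
  | cons a t ih =>
    rw [List.findSome?_cons, List.findSome?_cons, h a (List.mem_cons_self)]
    cases g a with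
    | none => exact ih (fun x hx => h x (List.mem_cons_of_mem a hx))
    | some b => rfl

theorem min?_isSome (l : List Int) (hne : l ≠ []) :
    ∃ m, PySem.List.min? l (fun x => x) = some m := by
  cases h : PySem.List.min? l (fun x => x) with
  | none => exact absurd ((PySem.List.min?_eq_none_iff l _).mp h) hne
  | some m => exact ⟨m, rfl⟩

theorem seg_ne_nil (value : List Int) (a b : Nat) (h1 : 0 < b) (h2 : a + b ≤ value.length) :
    List.take b (List.drop a value) ≠ [] := by
  apply List.ne_nil_of_length_pos
  simp only [List.length_take, List.length_drop]
  omega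

theorem segment_elem_iff (value : List Int) (lo hi : Int) (h0 : 0 ≤ lo) (hlh : lo ≤ hi)
    (hhi : hi ≤ (value.length : Int)) (x : Int) :
    x ∈ List.take (hi.toNat - lo.toNat) (List.drop lo.toNat value) ↔
      ∃ j : Int, lo ≤ j ∧ j < hi ∧ x = PySem.List.pyGetD value j 0 := by
  rw [mem_segment value _ _ (by omega)]
  constructor
  · rintro ⟨k, hk, rfl⟩
    exact ⟨((lo.toNat + k : Nat) : Int), by omega, by omega,
      (pyGetD_int_eq value _ _ rfl).symm⟩
  · rintro ⟨j, hj1, hj2, rfl⟩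
    exact ⟨(j - lo).toNat, by omega,
      by rw [pyGetD_int_eq value j (lo.toNat + (j - lo).toNat) (by omega)]⟩

theorem forall_segment_iff (value : List Int) (v : Int) (lo hi : Int) (h0 : 0 ≤ lo)
    (hlh : lo ≤ hi) (hhi : hi ≤ (value.length : Int)) :
    (∀ x ∈ List.take (hi.toNat - lo.toNat) (List.drop lo.toNat value), v < x) ↔
      (∀ j : Int, lo ≤ j → j < hi → v < PySem.List.pyGetD value j 0) := by
  constructor
  · intro h j hj1 hj2
    exact h _ ((segment_elem_iff value lo hi h0 hlh hhi _).mpr ⟨j, hj1, hj2, rfl⟩)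
  · intro h x hx
    rcases (segment_elem_iff value lo hi h0 hlh hhi x).mp hx with ⟨j, hj1, hj2, rfl⟩
    exact h j hj1 hj2

theorem point_eq (value : List Int) (w i : Int) (hw : 1 ≤ w)
    (h1 : w ≤ i) (h2 : i + w + 1 ≤ (value.length : Int)) :
    (match PySem.List.pyGet? value i,
           PySem.List.min? (PySem.List.slice value (some (i - w)) (some (i + w + 1))) (fun x => x),
           PySem.List.min? (PySem.List.slice value (some (i - w)) (some i)) (fun x => x),
           PySem.List.min? (PySem.List.slice value (some (i + 1)) (some (i + w + 1))) (fun x => x) with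
     | some v, some m, some ml, some mr =>
         if v = m ∧ v < ml ∧ v < mr then some ((value.length : Int) - 1 - i) else none
     | _, _, _, _ => none) =
    (match PySem.List.pyGet? (prevLE value) i with
     | none => none
     | some a =>
       match PySem.List.pyGet? (prevLE value.reverse) ((value.length : Int) - 1 - i) with
       | none => none
       | some b =>
         if a < i - w ∧ b < (value.length : Int) - 1 - i - w then
           some ((value.length : Int) - 1 - i)
         else none) := by
  have hv := pyGet?_eq_pyGetD value i (by omega) (by omega)
  have hFs := PySem.List.slice_of_nonneg value (a := i - w) (b := i + w + 1)
    (by omega) (by omega) (by omega) (by omega)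
  have hLs := PySem.List.slice_of_nonneg value (a := i - w) (b := i)
    (by omega) (by omega) (by omega) (by omega)
  have hRs := PySem.List.slice_of_nonneg value (a := i + 1) (b := i + w + 1)
    (by omega) (by omega) (by omega) (by omega)
  obtain ⟨m, hm⟩ := min?_isSome (PySem.List.slice value (some (i - w)) (some (i + w + 1)))
    (by rw [hFs]; exact seg_ne_nil value _ _ (by omega) (by omega))
  obtain ⟨ml, hml⟩ := min?_isSome (PySem.List.slice value (some (i - w)) (some i))
    (by rw [hLs]; exact seg_ne_nil value _ _ (by omega) (by omega))
  obtain ⟨mr, hmr⟩ := min?_isSome (PySem.List.slice value (some (i + 1)) (some (i + w + 1)))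
    (by rw [hRs]; exact seg_ne_nil value _ _ (by omega) (by omega))
  have hgA := pyGet?_eq_pyGetD (prevLE value) i (by omega)
    (by rw [prevLE_length]; omega)
  have hgB := pyGet?_eq_pyGetD (prevLE value.reverse) ((value.length : Int) - 1 - i)
    (by omega) (by rw [prevLE_length, List.length_reverse]; omega)
  have hmlA : (PySem.List.pyGetD value i 0 < ml) ↔
      (∀ j : Int, i - w ≤ j → j < i →
        PySem.List.pyGetD value i 0 < PySem.List.pyGetD value j 0) := by
    rw [pv_lt_min_iff _ ml _ hml, hLs]
    exact forall_segment_iff value _ (i - w) i (by omega) (by omega) (by omega)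
  have hmrA : (PySem.List.pyGetD value i 0 < mr) ↔
      (∀ j : Int, i < j → j ≤ i + w →
        PySem.List.pyGetD value i 0 < PySem.List.pyGetD value j 0) := by
    rw [pv_lt_min_iff _ mr _ hmr, hRs]
    rw [forall_segment_iff value _ (i + 1) (i + w + 1) (by omega) (by omega) (by omega)]
    constructor
    · intro h j hj1 hj2
      exact h j (by omega) (by omega)
    · intro h j hj1 hj2
      exact h j (by omega) (by omega)
  have hLiff : (PySem.List.pyGetD (prevLE value) i 0 < i - w) ↔
      (∀ j : Int, i - w ≤ j → j < i →
        PySem.List.pyGetD value i 0 < PySem.List.pyGetD value j 0) :=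
    pprev_iff value i w _ hw h1 (prevLE_spec value i (by omega) (by omega))
  have hrevlen : ((value.length : Int) - 1 - i) < (value.reverse.length : Int) := by
    rw [List.length_reverse]; omega
  have hRb := pprev_iff value.reverse ((value.length : Int) - 1 - i) w
    (PySem.List.pyGetD (prevLE value.reverse) ((value.length : Int) - 1 - i) 0)
    hw (by omega)
    (prevLE_spec value.reverse ((value.length : Int) - 1 - i) (by omega) hrevlen)
  have hrev_r : PySem.List.pyGetD value.reverse ((value.length : Int) - 1 - i) 0
      = PySem.List.pyGetD value i 0 := by
    rw [pyGetD_reverse value ((value.length : Int) - 1 - i) (by omega) (by omega)]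
    congr 1
    omega
  have hRaux : (PySem.List.pyGetD (prevLE value.reverse) ((value.length : Int) - 1 - i) 0
        < (value.length : Int) - 1 - i - w) ↔
      (∀ j : Int, i < j → j ≤ i + w →
        PySem.List.pyGetD value i 0 < PySem.List.pyGetD value j 0) := by
    rw [hRb]
    constructor
    · intro h j hj1 hj2
      have hx := h ((value.length : Int) - 1 - j) (by omega) (by omega)
      rw [hrev_r, pyGetD_reverse value ((value.length : Int) - 1 - j) (by omega) (by omega)] at hx
      have he : (value.length : Int) - 1 - ((value.length : Int) - 1 - j) = j := by omega
      rwa [he] at hx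
    · intro h j' hj1 hj2
      rw [hrev_r, pyGetD_reverse value j' (by omega) (by omega)]
      exact h ((value.length : Int) - 1 - j') (by omega) (by omega)
  have hvm : ((∀ j : Int, i - w ≤ j → j < i →
        PySem.List.pyGetD value i 0 < PySem.List.pyGetD value j 0) ∧
      (∀ j : Int, i < j → j ≤ i + w →
        PySem.List.pyGetD value i 0 < PySem.List.pyGetD value j 0)) →
      PySem.List.pyGetD value i 0 = m := by
    rintro ⟨hL, hR⟩
    have hvmem : PySem.List.pyGetD value i 0
        ∈ PySem.List.slice value (some (i - w)) (some (i + w + 1)) := by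
      rw [hFs]
      exact (segment_elem_iff value (i - w) (i + w + 1) (by omega) (by omega) (by omega) _).mpr
        ⟨i, by omega, by omega, rfl⟩
    refine le_antisymm ?_ (PySem.List.min?_isMin hm _ hvmem)
    have hmmem := PySem.List.min?_mem hm
    rw [hFs] at hmmem
    rcases (segment_elem_iff value (i - w) (i + w + 1) (by omega) (by omega) (by omega) m).mp
      hmmem with ⟨j, hj1, hj2, hjeq⟩
    rcases lt_trichotomy j i with hji | rfl | hij
    · rw [hjeq]; exact le_of_lt (hL j (by omega) hji)
    · rw [hjeq]
    · rw [hjeq]; exact le_of_lt (hR j hij (by omega))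
  have hiff : (PySem.List.pyGetD value i 0 = m ∧ PySem.List.pyGetD value i 0 < ml ∧
        PySem.List.pyGetD value i 0 < mr) ↔
      (PySem.List.pyGetD (prevLE value) i 0 < i - w ∧
        PySem.List.pyGetD (prevLE value.reverse) ((value.length : Int) - 1 - i) 0
          < (value.length : Int) - 1 - i - w) := by
    rw [hmlA, hmrA, hLiff, hRaux]
    constructor
    · rintro ⟨_, hL, hR⟩
      exact ⟨hL, hR⟩
    · rintro ⟨hL, hR⟩
      exact ⟨hvm ⟨hL, hR⟩, hL, hR⟩
  rw [hv, hm, hml, hmr, hgA, hgB]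
  simp only [hiff]


-- ===== VERDICT (by name: the statement is the Claim_ definition above) =====
theorem find_recent_trough_spec : Claim_equal_find_recent_trough := by
  intro value window hdom hpre
  unfold Spec_find_recent_trough
  by_cases hlt : window < 1
  · rcases hpre with h | ⟨rfl, rfl⟩
    · exact absurd h (by omega)
    · decide
  · rw [not_lt] at hlt
    unfold find_recent_trough find_recent_trough_alt
    rw [if_neg (by omega)]
    apply findSome?_congr
    intro x hx
    rw [PySem.List.mem_pyRange_neg_one] at hx
    exact point_eq value window x hlt (by omega) (by omega)
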